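-- pv_equiv track=rewrite | github.com/Mohaned5/vraudiobook | scripts/fid.py | get_epochs_from_steps
-- ===== SOURCE A (Python) =====
-- def get_epochs_from_steps(steps, images_per_epoch=20):
--     """Group steps into epochs based on jumps in step numbers."""
--     epochs = []
--     current_epoch = []
--
--     for i, step in enumerate(steps):
--         if i > 0 and step - steps[i - 1] > 1:
--             if current_epoch:  # Avoid appending empty lists
--                 epochs.append(current_epoch)
--             current_epoch = []
--         current_epoch.append(step)
--
--         if len(current_epoch) == images_per_epoch:
--             epochs.append(current_epoch)
--             current_epoch = []
--
--     if current_epoch:  # Append the last epoch if not empty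
--         epochs.append(current_epoch)
--
--     return epochs
-- ===== SOURCE B (Python) =====
-- def get_epochs_from_steps(steps, images_per_epoch=20):
--     """Group steps into epochs based on jumps in step numbers."""
--     # Pass 1: cut steps into maximal consecutive runs (adjacent diffs <= 1).
--     runs = []
--     cur = []
--     for s in steps:
--         if cur and s - cur[-1] > 1:
--             runs.append(cur)
--             cur = []
--         cur.append(s)
--     if cur:
--         runs.append(cur)
--     # Pass 2: split each run into chunks of images_per_epoch (whole run if size <= 0).
--     epochs = []
--     for run in runs:
--         if images_per_epoch <= 0:
--             epochs.append(run)
--         else: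
--             while run:
--                 epochs.append(run[:images_per_epoch])
--                 run = run[images_per_epoch:]
--     return epochs
-- ===== Notes on version B (the rewrite author's own statement) =====
-- stated objective: simpler
-- what changed: A's single loop interleaving the jump cut and the size flush is replaced by two separate passes: first cut steps into maximal consecutive runs (new run when step - prev > 1), then split each run into chunks of images_per_epoch (whole run when the size is non-positive).
import Mathlib
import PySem

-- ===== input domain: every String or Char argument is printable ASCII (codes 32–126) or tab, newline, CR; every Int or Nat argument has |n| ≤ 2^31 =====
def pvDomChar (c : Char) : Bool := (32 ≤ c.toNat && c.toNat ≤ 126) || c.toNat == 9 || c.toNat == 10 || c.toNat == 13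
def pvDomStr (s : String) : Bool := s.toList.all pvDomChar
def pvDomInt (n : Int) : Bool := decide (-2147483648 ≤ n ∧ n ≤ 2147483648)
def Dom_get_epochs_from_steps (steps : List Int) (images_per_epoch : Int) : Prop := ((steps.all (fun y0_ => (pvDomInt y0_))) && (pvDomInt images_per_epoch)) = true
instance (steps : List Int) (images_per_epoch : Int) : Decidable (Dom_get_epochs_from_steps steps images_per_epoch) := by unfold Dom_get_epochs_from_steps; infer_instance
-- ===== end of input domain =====

-- B replaces A's single loop (which interleaves the jump cut and the size flush) by two
-- passes: cut into maximal consecutive runs, then chunk each run; objective: simpler decomposition.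

-- ===== PORT A =====
-- literal transliteration of A: fold over enumerate(steps) with state (epochs, current_epoch)
def get_epochs_from_steps (steps : List Int) (images_per_epoch : Int) : List (List Int) :=
  let st := (PySem.List.enumerate steps 0).foldl
    (fun (st : List (List Int) × List Int) (p : Int × Int) =>
      let st1 :=
        if p.1 > 0 ∧ p.2 - ((PySem.List.pyGet? steps (p.1 - 1)).getD 0) > 1 then
          ((if st.2 ≠ [] then st.1 ++ [st.2] else st.1), ([] : List Int))
        else st
      let cur := st1.2 ++ [p.2]
      if (cur.length : Int) = images_per_epoch then (st1.1 ++ [cur], []) else (st1.1, cur))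
    ([], [])
  if st.2 ≠ [] then st.1 ++ [st.2] else st.1

-- ===== PORT B =====
-- pass 1 of Source B: the runs loop with state (runs, cur); cur[-1] is pyGet? cur (-1)
def pvRunsB (steps : List Int) : List (List Int) :=
  let st := steps.foldl
    (fun (st : List (List Int) × List Int) (s : Int) =>
      if st.2 ≠ [] ∧ s - ((PySem.List.pyGet? st.2 (-1)).getD 0) > 1 then
        (st.1 ++ [st.2], [s])
      else (st.1, st.2 ++ [s]))
    ([], [])
  if st.2 ≠ [] then st.1 ++ [st.2] else st.1

-- the 'while run:' chunking loop of Source B; reached only with n ≥ 1, where Python's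
-- run[:n] / run[n:] on the nonempty run x::xs are exactly x :: take (n-1) xs / drop (n-1) xs
def pvChunksGo (k : Nat) : List Int → List (List Int) → List (List Int)
  | [], out => out
  | x :: xs, out => pvChunksGo k (xs.drop (k - 1)) (out ++ [x :: xs.take (k - 1)])
  termination_by run => run.length
  decreasing_by simp

-- pass 2 of Source B: chunk each run (whole run if images_per_epoch <= 0), flattened into epochs
def get_epochs_from_steps_alt (steps : List Int) (images_per_epoch : Int) : List (List Int) :=
  (pvRunsB steps).foldl
    (fun (epochs : List (List Int)) (run : List Int) =>
      if images_per_epoch ≤ 0 then epochs ++ [run]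
      else pvChunksGo images_per_epoch.toNat run epochs)
    []

-- ===== PRECONDITION & SPEC =====
def Spec_get_epochs_from_steps (steps : List Int) (images_per_epoch : Int) (out : List (List Int)) : Prop := out = get_epochs_from_steps_alt steps images_per_epoch
instance (steps : List Int) (images_per_epoch : Int) (out : List (List Int)) : Decidable (Spec_get_epochs_from_steps steps images_per_epoch out) := by unfold Spec_get_epochs_from_steps; infer_instance

-- ===== CLAIM (what is proved, stated in full; the proofs are below) =====
def Claim_equal_get_epochs_from_steps : Prop := ∀ (steps : List Int) (images_per_epoch : Int), Dom_get_epochs_from_steps steps images_per_epoch → Spec_get_epochs_from_steps steps images_per_epoch (get_epochs_from_steps steps images_per_epoch)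

-- ===== LEMMAS AND PROOFS =====

-- reference split of the run continuing after element prev: (continuation, remainder)
def pvSplitRun (prev : Int) : List Int → List Int × List Int
  | [] => ([], [])
  | s :: rest =>
    if s - prev > 1 then ([], s :: rest)
    else (s :: (pvSplitRun s rest).1, (pvSplitRun s rest).2)

lemma pvSplitRun_snd_length (prev : Int) (l : List Int) :
    (pvSplitRun prev l).2.length ≤ l.length := by
  induction l generalizing prev with
  | nil => simp [pvSplitRun]
  | cons s rest ih =>
    rw [pvSplitRun]
    split_ifs with h
    · simp
    · exact le_trans (ih s) (by simp)

-- the runs of a list: maximal segments whose adjacent differences are ≤ 1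
def pvRuns : List Int → List (List Int)
  | [] => []
  | s :: rest => (s :: (pvSplitRun s rest).1) :: pvRuns (pvSplitRun s rest).2
  termination_by l => l.length
  decreasing_by
    have := pvSplitRun_snd_length s rest
    simp; omega

-- plain chunking into pieces of size k (used only with k ≥ 1)
def pvChunks (k : Nat) : List Int → List (List Int)
  | [] => []
  | x :: xs => (x :: xs.take (k - 1)) :: pvChunks k (xs.drop (k - 1))
  termination_by l => l.length
  decreasing_by simp

def pvChunkFn (ipe : Int) (run : List Int) : List (List Int) :=
  if ipe ≤ 0 then [run] else pvChunks ipe.toNat run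

lemma pvChunksGo_eq (k : Nat) : ∀ (n : Nat) (run : List Int), run.length ≤ n →
    ∀ (out : List (List Int)), pvChunksGo k run out = out ++ pvChunks k run := by
  intro n
  induction n with
  | zero =>
    intro run h out
    have : run = [] := List.eq_nil_of_length_eq_zero (by omega)
    subst this; rw [pvChunksGo, pvChunks]; simp
  | succ n ih =>
    intro run h out
    cases run with
    | nil => rw [pvChunksGo, pvChunks]; simp
    | cons x xs =>
      rw [pvChunksGo, pvChunks,
          ih (xs.drop (k - 1)) (by simp at h ⊢; omega)]
      simp

lemma pvChunks_small {k : Nat} {C : List Int} (h : C.length < k) :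
    pvChunks k C = if C = [] then [] else [C] := by
  cases C with
  | nil => rw [pvChunks]; simp
  | cons x xs =>
    rw [pvChunks]
    simp at h
    rw [List.take_of_length_le (by omega), List.drop_eq_nil_of_le (by omega)]
    rw [pvChunks]; simp

lemma pvChunks_nil (k : Nat) : pvChunks k [] = [] := by rw [pvChunks]

lemma pvChunks_full {k : Nat} (hk : 1 ≤ k) {C : List Int} (hC : C.length = k) (a : List Int) :
    pvChunks k (C ++ a) = C :: pvChunks k a := by
  cases C with
  | nil => simp at hC; omega
  | cons x xs =>
    simp at hC
    rw [List.cons_append, pvChunks]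
    have h1 : k - 1 = xs.length := by omega
    rw [h1, List.take_left, List.drop_left]

-- recursive form of A's loop: prev is the previous element of steps
def pvAGo (ipe : Int) : List Int → Int → List (List Int) → List Int → List (List Int)
  | [], _, E, C => if C ≠ [] then E ++ [C] else E
  | s :: rest, prev, E, C =>
    let st1 := if s - prev > 1 then ((if C ≠ [] then E ++ [C] else E), ([] : List Int)) else (E, C)
    let cur := st1.2 ++ [s]
    let st2 := if (cur.length : Int) = ipe then (st1.1 ++ [cur], ([] : List Int)) else (st1.1, cur)
    pvAGo ipe rest s st2.1 st2.2

-- A's fold over the enumeration equals pvAGo from the second element on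
lemma pvA_fold_eq (steps : List Int) (ipe : Int) :
    ∀ (rest : List Int) (k : Int) (prev : Int) (E : List (List Int)) (C : List Int),
      1 ≤ k → steps.drop k.toNat = rest → PySem.List.pyGet? steps (k - 1) = some prev →
      (let st := (PySem.List.enumerate rest k).foldl
        (fun (st : List (List Int) × List Int) (p : Int × Int) =>
          let st1 :=
            if p.1 > 0 ∧ p.2 - ((PySem.List.pyGet? steps (p.1 - 1)).getD 0) > 1 then
              ((if st.2 ≠ [] then st.1 ++ [st.2] else st.1), ([] : List Int))
            else st
          let cur := st1.2 ++ [p.2]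
          if (cur.length : Int) = ipe then (st1.1 ++ [cur], []) else (st1.1, cur))
        (E, C)
       if st.2 ≠ [] then st.1 ++ [st.2] else st.1) = pvAGo ipe rest prev E C := by
  intro rest
  induction rest with
  | nil =>
    intro k prev E C _ _ _
    rw [pvAGo, PySem.List.enumerate_nil]
    rfl
  | cons s rest' ih =>
    intro k prev E C hk hdrop hprev
    have hks : steps[k.toNat]? = some s := by
      have h0 : (steps.drop k.toNat)[0]? = some s := by rw [hdrop]; rfl
      rw [List.getElem?_drop] at h0; simpa using h0
    have hkpos : k > 0 := by omega
    rw [PySem.List.enumerate_cons, List.foldl_cons, pvAGo]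
    simp only [hprev, Option.getD_some, hkpos, true_and]
    have hdrop' : steps.drop (k + 1).toNat = rest' := by
      have h1 : (k + 1).toNat = k.toNat + 1 := by omega
      have h2 : steps.drop (k.toNat + 1) = (steps.drop k.toNat).tail := by
        rw [List.tail_drop]
      rw [h1, h2, hdrop]
      rfl
    have hprev' : PySem.List.pyGet? steps (k + 1 - 1) = some s := by
      have h3 : k + 1 - 1 = ((k.toNat : Nat) : Int) := by omega
      rw [h3, PySem.List.pyGet?_natCast, hks]
    exact ih (k + 1) s _ _ (by omega) hdrop' hprev'

-- with a non-positive chunk size the size flush never fires: A's loop just collects runs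
lemma pvAGo_nonpos {ipe : Int} (hipe : ipe ≤ 0) :
    ∀ (rest : List Int) (prev : Int) (E : List (List Int)) (C : List Int), C ≠ [] →
      pvAGo ipe rest prev E C =
        E ++ (C ++ (pvSplitRun prev rest).1) :: pvRuns (pvSplitRun prev rest).2 := by
  intro rest
  induction rest with
  | nil =>
    intro prev E C hC
    rw [pvAGo, pvSplitRun]
    rw [show pvRuns ((([] : List Int), ([] : List Int)).2) = [] from by rw [pvRuns]]
    simp [hC]
  | cons s rest' ih =>
    intro prev E C hC
    have hflush : ∀ (l : List Int), ¬ (((l ++ [s]).length : Int) = ipe) := by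
      intro l; simp; omega
    rw [pvAGo, pvSplitRun]
    by_cases h : s - prev > 1
    · rw [if_pos h, if_pos h, if_pos hC, if_neg (hflush _)]
      show pvAGo ipe rest' s (E ++ [C]) ([] ++ [s]) =
        E ++ (C ++ ([], s :: rest').1) :: pvRuns (([], s :: rest').2)
      rw [show ([] : List Int) ++ [s] = [s] from rfl,
          ih s (E ++ [C]) [s] (by simp), pvRuns]
      simp
    · rw [if_neg h, if_neg h, if_neg (hflush _)]
      show pvAGo ipe rest' s E (C ++ [s]) = E ++
        (C ++ (s :: (pvSplitRun s rest').1, (pvSplitRun s rest').2).1) ::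
          pvRuns ((s :: (pvSplitRun s rest').1, (pvSplitRun s rest').2).2)
      rw [ih s E (C ++ [s]) (by simp)]
      simp

-- with chunk size k ≥ 1: A's loop emits the chunks of each run, C being the pending remainder
lemma pvAGo_pos {k : Nat} (hk : 1 ≤ k) {ipe : Int} (hipe : ipe = (k : Int)) :
    ∀ (rest : List Int) (prev : Int) (E : List (List Int)) (C : List Int), C.length < k →
      pvAGo ipe rest prev E C =
        E ++ pvChunks k (C ++ (pvSplitRun prev rest).1)
          ++ (pvRuns (pvSplitRun prev rest).2).flatMap (pvChunks k) := by
  intro rest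
  induction rest with
  | nil =>
    intro prev E C hC
    rw [pvAGo, pvSplitRun]
    rw [show pvRuns ((([] : List Int), ([] : List Int)).2) = [] from by rw [pvRuns]]
    rw [show (C ++ ((([] : List Int), ([] : List Int)).1)) = C from by simp, pvChunks_small hC]
    by_cases h : C = [] <;> simp [h]
  | cons s rest' ih =>
    intro prev E C hC
    have hCch : pvChunks k C = if C = [] then [] else [C] := pvChunks_small hC
    have hruns : pvRuns (s :: rest') = (s :: (pvSplitRun s rest').1) :: pvRuns (pvSplitRun s rest').2 := by
      rw [pvRuns]
    rw [pvAGo, pvSplitRun]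
    by_cases h : s - prev > 1
    · -- jump: flush C, start fresh with [s]
      rw [if_pos h, if_pos h]
      by_cases h1 : ((((if C ≠ [] then E ++ [C] else E, ([] : List Int)).2 ++ [s]).length : Int)) = ipe
      · have hk1 : k = 1 := by
          have h2 : ((((if C ≠ [] then E ++ [C] else E, ([] : List Int)).2 ++ [s]).length : Int)) = ipe := h1
          rw [hipe] at h2; simp at h2; omega
        subst hk1
        rw [if_pos h1]
        show pvAGo ipe rest' s ((if C ≠ [] then E ++ [C] else E) ++ [[] ++ [s]]) [] =
          E ++ pvChunks 1 (C ++ (([] : List Int), s :: rest').1) ++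
            (pvRuns ((([] : List Int), s :: rest').2)).flatMap (pvChunks 1)
        rw [ih s _ [] (by simp)]
        have hch : pvChunks 1 (s :: (pvSplitRun s rest').1) = [s] :: pvChunks 1 (pvSplitRun s rest').1 := by
          rw [show s :: (pvSplitRun s rest').1 = [s] ++ (pvSplitRun s rest').1 from rfl]
          exact pvChunks_full (le_refl 1) (by simp) _
        by_cases hc : C = [] <;> simp [hruns, hch, hc, hCch, pvChunks_nil]
      · have hk2 : 2 ≤ k := by
          have h2 : ¬ ((((if C ≠ [] then E ++ [C] else E, ([] : List Int)).2 ++ [s]).length : Int)) = ipe := h1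
          rw [hipe] at h2; simp at h2; omega
        rw [if_neg h1]
        show pvAGo ipe rest' s (if C ≠ [] then E ++ [C] else E) ([] ++ [s]) =
          E ++ pvChunks k (C ++ (([] : List Int), s :: rest').1) ++
            (pvRuns ((([] : List Int), s :: rest').2)).flatMap (pvChunks k)
        rw [show ([] : List Int) ++ [s] = [s] from rfl, ih s _ [s] (by simp; omega)]
        by_cases hc : C = [] <;> simp [hruns, hc, hCch, pvChunks_nil]
    · -- same run: append s, flush only when the chunk is complete
      rw [if_neg h, if_neg h]
      by_cases h1 : ((((E, C).2 ++ [s]).length : Int)) = ipe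
      · have hfull : (C ++ [s]).length = k := by
          have h2 : (((C ++ [s]).length : Int)) = ipe := h1
          rw [hipe] at h2; exact_mod_cast h2
        rw [if_pos h1]
        show pvAGo ipe rest' s (E ++ [C ++ [s]]) [] =
          E ++ pvChunks k (C ++ (s :: (pvSplitRun s rest').1, (pvSplitRun s rest').2).1) ++
            (pvRuns ((s :: (pvSplitRun s rest').1, (pvSplitRun s rest').2).2)).flatMap (pvChunks k)
        rw [ih s _ [] (by simpa using hk)]
        have hch2 : pvChunks k (C ++ s :: (pvSplitRun s rest').1) =
            (C ++ [s]) :: pvChunks k (pvSplitRun s rest').1 := by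
          rw [show C ++ s :: (pvSplitRun s rest').1 = (C ++ [s]) ++ (pvSplitRun s rest').1 from by simp]
          exact pvChunks_full hk hfull _
        simp [hch2]
      · have hlt : (C ++ [s]).length < k := by
          have h2 : ¬ (((C ++ [s]).length : Int)) = ipe := h1
          rw [hipe] at h2; simp at h2 ⊢; omega
        rw [if_neg h1]
        show pvAGo ipe rest' s E (C ++ [s]) =
          E ++ pvChunks k (C ++ (s :: (pvSplitRun s rest').1, (pvSplitRun s rest').2).1) ++
            (pvRuns ((s :: (pvSplitRun s rest').1, (pvSplitRun s rest').2).2)).flatMap (pvChunks k)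
        rw [ih s _ _ hlt]
        simp [List.append_assoc]

-- A equals: chunk every run
lemma pvA_characterization (steps : List Int) (ipe : Int) :
    get_epochs_from_steps steps ipe = (pvRuns steps).flatMap (pvChunkFn ipe) := by
  cases steps with
  | nil => rw [pvRuns]; simp [get_epochs_from_steps, PySem.List.enumerate_nil]
  | cons s rest =>
    unfold get_epochs_from_steps
    rw [PySem.List.enumerate_cons, List.foldl_cons]
    have hfold := pvA_fold_eq (s :: rest) ipe rest (0 + 1) s
      (if (([s].length : Int)) = ipe then ((([] : List (List Int)) ++ [[] ++ [s]]), ([] : List Int)) else ([], [] ++ [s])).1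
      (if (([s].length : Int)) = ipe then ((([] : List (List Int)) ++ [[] ++ [s]]), ([] : List Int)) else ([], [] ++ [s])).2
      (by omega) (by norm_num) (by norm_num [PySem.List.pyGet?_zero])
    refine Eq.trans (Eq.trans ?_ hfold) ?_
    · rfl
    · -- pvAGo from the state after the first element equals the chunked runs
      rw [pvRuns]
      by_cases h1 : (([s].length : Int)) = ipe
      · have hk1 : ipe = ((1 : Nat) : Int) := by simpa using h1.symm
        rw [if_pos h1]
        rw [pvAGo_pos (le_refl 1) hk1 rest s _ _ (by simp)]
        have hch : pvChunks 1 (s :: (pvSplitRun s rest).1) = [s] :: pvChunks 1 (pvSplitRun s rest).1 := by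
          rw [show s :: (pvSplitRun s rest).1 = [s] ++ (pvSplitRun s rest).1 from rfl]
          exact pvChunks_full (le_refl 1) (by simp) _
        have ht : ipe.toNat = 1 := by omega
        have hfn : pvChunkFn ipe = pvChunks 1 := by
          funext r; simp [pvChunkFn, show ¬ ipe ≤ 0 by omega, ht]
        simp [hfn, hch]
      · rw [if_neg h1]
        by_cases hip : ipe ≤ 0
        · rw [pvAGo_nonpos hip rest s _ _ (by simp)]
          have hfn : pvChunkFn ipe = fun r => [r] := by funext r; simp [pvChunkFn, hip]
          simp [hfn]
        · have hk : 1 ≤ ipe.toNat := by omega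
          have hk2 : 2 ≤ ipe.toNat := by simp at h1; omega
          have hke : ipe = ((ipe.toNat : Nat) : Int) := by omega
          rw [pvAGo_pos hk hke rest s _ _ (by simp; omega)]
          have hfn : pvChunkFn ipe = pvChunks ipe.toNat := by funext r; simp [pvChunkFn, hip]
          simp [hfn]

-- B's first pass equals pvRuns
lemma pvRunsB_fold :
    ∀ (rest : List Int) (prev : Int) (Rs : List (List Int)) (cur : List Int),
      cur ≠ [] → cur.getLast? = some prev →
      (let st := rest.foldl
        (fun (st : List (List Int) × List Int) (s : Int) =>
          if st.2 ≠ [] ∧ s - ((PySem.List.pyGet? st.2 (-1)).getD 0) > 1 then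
            (st.1 ++ [st.2], [s])
          else (st.1, st.2 ++ [s]))
        (Rs, cur)
       if st.2 ≠ [] then st.1 ++ [st.2] else st.1)
      = Rs ++ (cur ++ (pvSplitRun prev rest).1) :: pvRuns (pvSplitRun prev rest).2 := by
  intro rest
  induction rest with
  | nil =>
    intro prev Rs cur hcur _
    rw [pvSplitRun]
    rw [show pvRuns ((([] : List Int), ([] : List Int)).2) = [] from by rw [pvRuns]]
    simp [hcur]
  | cons s rest' ih =>
    intro prev Rs cur hcur hlast
    rw [List.foldl_cons, pvSplitRun]
    have hget : PySem.List.pyGet? cur (-1) = some prev := by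
      rw [PySem.List.pyGet?_neg_one, hlast]
    by_cases h : s - prev > 1
    · rw [if_pos (show (Rs, cur).2 ≠ [] ∧ s - ((PySem.List.pyGet? (Rs, cur).2 (-1)).getD 0) > 1 from
          by simpa [hget] using ⟨hcur, h⟩), if_pos h]
      refine Eq.trans (Eq.trans ?_ (ih s (Rs ++ [cur]) [s] (by simp) (by simp))) ?_
      · rfl
      · rw [show pvRuns ((([] : List Int), s :: rest').2) = pvRuns (s :: rest') from rfl, pvRuns]
        simp
    · rw [if_neg (show ¬ ((Rs, cur).2 ≠ [] ∧ s - ((PySem.List.pyGet? (Rs, cur).2 (-1)).getD 0) > 1) from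
          by simp [hget]; omega), if_neg h]
      refine Eq.trans (Eq.trans ?_ (ih s Rs (cur ++ [s]) (by simp) (by simp))) ?_
      · rfl
      · simp

lemma pvRunsB_eq (steps : List Int) : pvRunsB steps = pvRuns steps := by
  cases steps with
  | nil => rw [pvRuns]; simp [pvRunsB]
  | cons s rest =>
    unfold pvRunsB
    rw [List.foldl_cons]
    refine Eq.trans (Eq.trans ?_ (pvRunsB_fold rest s [] ([] ++ [s]) (by simp) (by simp))) ?_
    · rfl
    · rw [pvRuns]
      simp

-- B's second pass equals: chunk every run
lemma pvB_characterization (steps : List Int) (ipe : Int) :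
    get_epochs_from_steps_alt steps ipe = (pvRuns steps).flatMap (pvChunkFn ipe) := by
  unfold get_epochs_from_steps_alt
  rw [pvRunsB_eq]
  generalize pvRuns steps = runs
  suffices h : ∀ (runs : List (List Int)) (acc : List (List Int)),
      runs.foldl (fun epochs run => if ipe ≤ 0 then epochs ++ [run]
        else pvChunksGo ipe.toNat run epochs) acc = acc ++ runs.flatMap (pvChunkFn ipe) by
    simpa using h runs []
  intro runs
  induction runs with
  | nil => simp
  | cons r rs ih =>
    intro acc
    rw [List.foldl_cons, List.flatMap_cons]
    by_cases h : ipe ≤ 0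
    · rw [if_pos h, ih]; simp [pvChunkFn, h]
    · rw [if_neg h, pvChunksGo_eq ipe.toNat r.length r (le_refl _) acc, ih]
      simp [pvChunkFn, h]

-- ===== VERDICT (by name: the statement is the Claim_ definition above) =====
theorem get_epochs_from_steps_spec : Claim_equal_get_epochs_from_steps := by
  intro steps ipe _
  unfold Spec_get_epochs_from_steps
  rw [pvA_characterization, pvB_characterization]
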